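-- pv_equiv track=rewrite | github.com/yzjsswk/Sol | lock.py | gen_pixel_point
-- ===== SOURCE A (Python) =====
-- def gen_pixel_point(data):
--   if data == None or len(data) == 0:
--       return []
--   res = [(0, 0, 0)]
--   for i, d in enumerate(data):
--       nxt_p, nxt_t = get_next(res[i])
--       res.append((nxt_p, nxt_t, d))
--   return res[1:]
--
-- def get_next(pp):
--   p, t, d = pp
--   shift = t + d%9 + 1
--   p += shift // 3
--   t = shift % 3
--   return p, t
-- ===== SOURCE B (Python) =====
-- def gen_pixel_point(data):
--     if data is None or len(data) == 0:
--         return []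
--     # closed form: A's state satisfies 3*p + t = S, the running sum of (prev_d % 9 + 1);
--     # so each output point is just divmod(S_i, 3) plus the element.
--     sums = []
--     s = 0
--     for d in [0] + data[:-1]:
--         s += d % 9 + 1
--         sums.append(s)
--     return [(s // 3, s % 3, d) for s, d in zip(sums, data)]
-- ===== Notes on version B (the rewrite author's own statement) =====
-- stated objective: alternative
-- what changed: Replaces A's threaded (p,t) state recurrence (sentinel list read back via get_next) by the closed form 3*p+t = prefix sum of (prev_d%9+1): B builds the prefix-sum list of the shifted weights in one pass and then maps divmod(S,3) over it zipped with data.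
import Mathlib
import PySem

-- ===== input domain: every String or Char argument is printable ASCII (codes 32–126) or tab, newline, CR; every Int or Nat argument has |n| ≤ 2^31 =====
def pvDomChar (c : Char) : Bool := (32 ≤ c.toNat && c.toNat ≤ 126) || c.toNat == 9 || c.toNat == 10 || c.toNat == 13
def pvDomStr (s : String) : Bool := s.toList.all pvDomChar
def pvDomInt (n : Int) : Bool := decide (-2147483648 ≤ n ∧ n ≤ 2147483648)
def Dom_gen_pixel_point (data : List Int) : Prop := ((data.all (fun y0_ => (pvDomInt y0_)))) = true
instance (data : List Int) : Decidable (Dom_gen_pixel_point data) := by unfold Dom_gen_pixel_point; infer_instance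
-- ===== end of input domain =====

-- B replaces A's threaded (p,t) recurrence with the closed form 3*p+t = prefix sum of the
-- shifted weights (prev_d%9+1), mapping divmod(S,3) over the prefix-sum list; objective: alternative.


-- ===== PORT A =====
def get_next (pp : Int × Int × Int) : Int × Int :=
  let p := pp.1
  let t := pp.2.1
  let d := pp.2.2
  let shift := t + PySem.Int.mod d 9 + 1
  (p + PySem.Int.floordiv shift 3, PySem.Int.mod shift 3)

def gen_pixel_point (data : List Int) : List (Int × Int × Int) :=
  if data.length = 0 then []
  else
    let res := (PySem.List.enumerate data).foldl
      (fun res (id : Int × Int) =>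
        -- res[i] is always in range in A's loop (res has i+1 elements); pyGetD is the exact in-range read
        let pp := PySem.List.pyGetD res id.1 (0, 0, 0)
        let nxt := get_next pp
        res ++ [(nxt.1, nxt.2, id.2)]) [(0, 0, 0)]
    PySem.List.slice res (some 1) none

-- ===== PORT B =====
def gen_pixel_point_alt (data : List Int) : List (Int × Int × Int) :=
  if data.length = 0 then []
  else
    -- pass 1: prefix sums of the shifted weights [0] ++ data[:-1]
    let sums := ((0 :: PySem.List.slice data none (some (-1))).foldl
      (fun (st : Int × List Int) d =>
        let s := st.1 + PySem.Int.mod d 9 + 1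
        (s, st.2 ++ [s])) (0, [])).2
    -- pass 2: divmod each prefix sum by 3, zipped with data
    (sums.zip data).map (fun sd => (PySem.Int.floordiv sd.1 3, PySem.Int.mod sd.1 3, sd.2))

-- ===== PRECONDITION & SPEC =====
def Spec_gen_pixel_point (data : List Int) (out : List (Int × Int × Int)) : Prop := out = gen_pixel_point_alt data
instance (data : List Int) (out : List (Int × Int × Int)) : Decidable (Spec_gen_pixel_point data out) := by unfold Spec_gen_pixel_point; infer_instance

-- ===== CLAIM =====
def Claim_equal_gen_pixel_point : Prop := ∀ (data : List Int), Dom_gen_pixel_point data → Spec_gen_pixel_point data (gen_pixel_point data)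

-- ===== LEMMAS AND PROOFS =====

-- common reference: the stream of points generated from state (p, t, prev_d)
def pvRef (p t pd : Int) : List Int → List (Int × Int × Int)
  | [] => []
  | d :: rest =>
      let sh := t + PySem.Int.mod pd 9 + 1
      (p + PySem.Int.floordiv sh 3, PySem.Int.mod sh 3, d)
        :: pvRef (p + PySem.Int.floordiv sh 3) (PySem.Int.mod sh 3) d rest

-- A's loop body, named for the proofs
def pvAStep (res : List (Int × Int × Int)) (id : Int × Int) : List (Int × Int × Int) :=
  let pp := PySem.List.pyGetD res id.1 (0, 0, 0)
  let nxt := get_next pp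
  res ++ [(nxt.1, nxt.2, id.2)]

-- B's prefix-sum loop body, named for the proofs
def pvBStep (st : Int × List Int) (d : Int) : Int × List Int :=
  let s := st.1 + PySem.Int.mod d 9 + 1
  (s, st.2 ++ [s])

-- A's fold, started from a list whose last element carries the state, produces pvRef
lemma pvA_ref (data : List Int) (i : Nat) (res : List (Int × Int × Int)) (p t pd : Int)
    (hlen : res.length = i + 1) (hlast : res.getLast? = some (p, t, pd)) :
    (PySem.List.enumerate data (i : Int)).foldl pvAStep res = res ++ pvRef p t pd data := by
  induction data generalizing i res p t pd with
  | nil => simp [PySem.List.enumerate_nil, pvRef]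
  | cons d rest ih =>
      rw [PySem.List.enumerate_cons, List.foldl_cons]
      have hget : PySem.List.pyGetD res (i : Int) (0, 0, 0) = (p, t, pd) := by
        rw [PySem.List.pyGetD_natCast]
        have : res[i]? = some (p, t, pd) := by
          rw [← hlast, List.getLast?_eq_getElem?, hlen]
          simp
        simp [List.getD, this]
      have hstep : pvAStep res ((i : Int), d)
          = res ++ [(p + PySem.Int.floordiv (t + PySem.Int.mod pd 9 + 1) 3,
                     PySem.Int.mod (t + PySem.Int.mod pd 9 + 1) 3, d)] := by
        simp [pvAStep, hget, get_next]
      rw [hstep]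
      have h1 : ((i : Int) + 1) = ((i + 1 : Nat) : Int) := by push_cast; ring
      rw [h1, ih (i + 1) _ (p + PySem.Int.floordiv (t + PySem.Int.mod pd 9 + 1) 3)
            (PySem.Int.mod (t + PySem.Int.mod pd 9 + 1) 3) d
            (by simp [hlen]) (by simp)]
      simp [pvRef]

-- B's sums accumulator factors out of the fold
lemma pvB_out (ws : List Int) (s : Int) (acc : List Int) :
    (ws.foldl pvBStep (s, acc)).2 = acc ++ (ws.foldl pvBStep (s, [])).2 := by
  induction ws generalizing s acc with
  | nil => simp
  | cons w rest ih =>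
      simp only [List.foldl_cons, pvBStep]
      rw [ih, ih (acc := [] ++ _)]
      simp

-- one step of B's prefix-sum loop, in cons form
lemma pvB_sums_cons (w : Int) (ws : List Int) (s : Int) :
    (((w :: ws).foldl pvBStep (s, [])).2)
      = (s + PySem.Int.mod w 9 + 1) :: ((ws.foldl pvBStep (s + PySem.Int.mod w 9 + 1, [])).2) := by
  simp only [List.foldl_cons, pvBStep]
  rw [pvB_out]
  simp

-- B's zip-map over prefix sums equals pvRef, via the invariant s = 3*p + t, 0 ≤ t < 3
lemma pvB_ref (l : List Int) (pd s p t : Int) (hs : s = 3 * p + t) (h0 : 0 ≤ t) (h3 : t < 3) :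
    ((((pd :: l.dropLast).foldl pvBStep (s, [])).2.zip l).map
        (fun sd => (PySem.Int.floordiv sd.1 3, PySem.Int.mod sd.1 3, sd.2)))
      = pvRef p t pd l := by
  have hm9 : ∀ a : Int, PySem.Int.mod a 9 = a % 9 :=
    fun a => PySem.Int.mod_eq_emod_of_pos (a := a) (b := 9) (by norm_num)
  have hm3 : ∀ a : Int, PySem.Int.mod a 3 = a % 3 :=
    fun a => PySem.Int.mod_eq_emod_of_pos (a := a) (b := 3) (by norm_num)
  have hd3 : ∀ a : Int, PySem.Int.floordiv a 3 = a / 3 :=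
    fun a => PySem.Int.floordiv_eq_ediv_of_pos (a := a) (b := 3) (by norm_num)
  induction l generalizing pd s p t with
  | nil => simp [pvBStep, pvRef]
  | cons d rest ih =>
      rw [pvB_sums_cons, List.zip_cons_cons, List.map_cons]
      have hdiv : (s + pd % 9 + 1) / 3 = p + (t + pd % 9 + 1) / 3 := by omega
      have hmod : (s + pd % 9 + 1) % 3 = (t + pd % 9 + 1) % 3 := by omega
      cases rest with
      | nil =>
          simp [pvRef, hdiv, hmod]
      | cons d2 rest2 =>
          rw [List.dropLast_cons₂,
            ih d (s + PySem.Int.mod pd 9 + 1) (p + PySem.Int.floordiv (t + PySem.Int.mod pd 9 + 1) 3)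
              (PySem.Int.mod (t + PySem.Int.mod pd 9 + 1) 3)
              (by simp only [hm9, hm3, hd3]; omega)
              (by simp only [hm9, hm3]; omega)
              (by simp only [hm9, hm3]; omega)]
          simp only [pvRef, hm9, hm3, hd3]
          simp [hdiv, hmod]

-- ===== VERDICT =====
theorem gen_pixel_point_spec : Claim_equal_gen_pixel_point := by
  intro data _
  show gen_pixel_point data = gen_pixel_point_alt data
  cases data with
  | nil => simp [gen_pixel_point, gen_pixel_point_alt]
  | cons d rest =>
      unfold gen_pixel_point gen_pixel_point_alt
      simp only [List.length_cons, if_neg (by omega : ¬ (rest.length + 1 = 0))]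
      have h0 : ((0 : Int)) = ((0 : Nat) : Int) := rfl
      rw [h0]
      show PySem.List.slice
          ((PySem.List.enumerate (d :: rest) ((0 : Nat) : Int)).foldl pvAStep [(0, 0, 0)])
          (some 1) none = _
      rw [pvA_ref (d :: rest) 0 [(0, 0, 0)] 0 0 0 (by simp) (by simp),
          PySem.List.slice_from_one]
      show pvRef 0 0 0 (d :: rest)
        = ((((0 :: PySem.List.slice (d :: rest) none (some (-1))).foldl pvBStep (0, [])).2.zip
            (d :: rest)).map (fun sd => (PySem.Int.floordiv sd.1 3, PySem.Int.mod sd.1 3, sd.2)))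
      rw [PySem.List.slice_to_neg_one,
          pvB_ref (d :: rest) 0 0 0 0 (by ring) le_rfl (by omega)]
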